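-- pv_equiv track=rewrite | github.com/E-B-J/wormfind | coco_api_embryo_div_functional.py | seg_transpose
-- ===== SOURCE A (Python) =====
-- def seg_transpose(wormbbox, embryo_seg):
--     seg_holder = embryo_seg
--     for y in range(0, len(seg_holder[0])): #y is a single point within the segmentation coords
--         if y % 2 == 0:#if y is x coord
--             seg_holder[0][y] -=wormbbox[0]
--         elif y % 2 == 1:#if y is y cord
--             seg_holder[0][y] -=wormbbox[1]
--     return(seg_holder)
-- ===== SOURCE B (Python) =====
-- def seg_transpose(wormbbox, embryo_seg):
--     row = embryo_seg[0]
--     out = []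
--     i = 0
--     while i + 1 < len(row):
--         out.append(row[i] - wormbbox[0])
--         out.append(row[i + 1] - wormbbox[1])
--         i += 2
--     if i < len(row):
--         out.append(row[i] - wormbbox[0])
--     row[:] = out
--     return embryo_seg
-- ===== Notes on version B (the rewrite author's own statement) =====
-- stated objective: alternative
-- what changed: Replaces the per-index loop with a parity test by a two-at-a-time pairwise pass that builds the shifted row and writes it back with one slice assignment.
import Mathlib
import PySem

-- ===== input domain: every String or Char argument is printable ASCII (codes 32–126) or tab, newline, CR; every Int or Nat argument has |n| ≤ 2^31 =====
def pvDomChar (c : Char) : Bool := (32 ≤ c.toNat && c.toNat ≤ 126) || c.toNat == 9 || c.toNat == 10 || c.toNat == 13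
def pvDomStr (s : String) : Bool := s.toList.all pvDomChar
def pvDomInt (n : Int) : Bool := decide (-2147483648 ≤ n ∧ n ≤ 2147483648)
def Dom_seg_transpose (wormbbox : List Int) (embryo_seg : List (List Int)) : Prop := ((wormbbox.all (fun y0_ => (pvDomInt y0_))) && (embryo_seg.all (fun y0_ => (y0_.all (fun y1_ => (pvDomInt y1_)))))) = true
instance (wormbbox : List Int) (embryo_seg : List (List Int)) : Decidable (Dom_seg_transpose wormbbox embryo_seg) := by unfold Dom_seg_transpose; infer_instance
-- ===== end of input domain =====

-- B replaces A's per-index loop with a two-at-a-time pairwise pass (objective: alternative decomposition).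
-- Both Pythons mutate embryo_seg[0] in place identically; the theorems here are about the return value.

-- ===== PORT A =====
-- one loop step: index y of the first row gets wormbbox[0] or wormbbox[1] subtracted, by parity of y
def segAStep (wormbbox : List Int) (row : List Int) (y : Nat) : List Int :=
  if y % 2 == 0 then row.set y (row.getD y 0 - PySem.List.pyGetD wormbbox 0 0)
  else row.set y (row.getD y 0 - PySem.List.pyGetD wormbbox 1 0)

def seg_transpose (wormbbox : List Int) (embryo_seg : List (List Int)) : List (List Int) :=
  match embryo_seg with
  | [] => []  -- Python raises IndexError here; excluded by Pre_
  | row :: rest => ((List.range row.length).foldl (segAStep wormbbox) row) :: rest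

-- ===== PORT B =====
-- B's while loop consumes the row two coordinates at a time, appending the shifted pair
def segShift (wormbbox : List Int) : List Int → List Int
  | x :: y :: rest =>
      (x - PySem.List.pyGetD wormbbox 0 0) :: (y - PySem.List.pyGetD wormbbox 1 0) ::
        segShift wormbbox rest
  | [x] => [x - PySem.List.pyGetD wormbbox 0 0]
  | [] => []

def seg_transpose_alt (wormbbox : List Int) (embryo_seg : List (List Int)) : List (List Int) :=
  match embryo_seg with
  | [] => []  -- Python raises IndexError here; excluded by Pre_
  | row :: rest => segShift wormbbox row :: rest

-- ===== PRECONDITION & SPEC =====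
-- Exactly the inputs on which Python A returns: embryo_seg nonempty, and wormbbox long enough
-- for the coordinate indices the first row forces (0 if it has any element, 1 if it has ≥ 2).
def Pre_seg_transpose (wormbbox : List Int) (embryo_seg : List (List Int)) : Prop :=
  embryo_seg ≠ [] ∧
    ((embryo_seg.headD []).length = 0 ∨
     ((embryo_seg.headD []).length = 1 ∧ 1 ≤ wormbbox.length) ∨
     2 ≤ wormbbox.length)
instance (wormbbox : List Int) (embryo_seg : List (List Int)) : Decidable (Pre_seg_transpose wormbbox embryo_seg) := by unfold Pre_seg_transpose; infer_instance

def pvWitness_seg_transpose : List Int × List (List Int) := ([3, 5], [[10, 20, 30, 40, 50]])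

def Spec_seg_transpose (wormbbox : List Int) (embryo_seg : List (List Int)) (out : List (List Int)) : Prop := out = seg_transpose_alt wormbbox embryo_seg
instance (wormbbox : List Int) (embryo_seg : List (List Int)) (out : List (List Int)) : Decidable (Spec_seg_transpose wormbbox embryo_seg out) := by unfold Spec_seg_transpose; infer_instance

-- ===== CLAIM (what is proved, stated in full; the proofs are below) =====
def Claim_equal_seg_transpose : Prop := ∀ (wormbbox : List Int) (embryo_seg : List (List Int)), Dom_seg_transpose wormbbox embryo_seg → Pre_seg_transpose wormbbox embryo_seg → Spec_seg_transpose wormbbox embryo_seg (seg_transpose wormbbox embryo_seg)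

-- ===== LEMMAS AND PROOFS =====

-- the per-index delta both programs subtract at position i
def parityDelta (wormbbox : List Int) (i : Nat) : Int :=
  if i % 2 == 0 then PySem.List.pyGetD wormbbox 0 0 else PySem.List.pyGetD wormbbox 1 0

theorem segAStep_eq (wormbbox : List Int) (row : List Int) (y : Nat) :
    segAStep wormbbox row y = row.set y (row.getD y 0 - parityDelta wormbbox y) := by
  unfold segAStep parityDelta; split_ifs <;> rfl

theorem length_foldl_segAStep (wormbbox : List Int) (l : List Nat) (row : List Int) :
    (l.foldl (segAStep wormbbox) row).length = row.length := by
  induction l generalizing row with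
  | nil => rfl
  | cons a l ih => simp [List.foldl, ih, segAStep_eq]

theorem foldl_segAStep_untouched (wormbbox : List Int) (l : List Nat) (r : List Int)
    (i : Nat) (hni : i ∉ l) : (l.foldl (segAStep wormbbox) r)[i]? = r[i]? := by
  induction l generalizing r with
  | nil => rfl
  | cons b l ihb =>
    simp only [List.foldl_cons]
    rw [ihb _ (fun hb => hni (List.mem_cons_of_mem _ hb))]
    rw [segAStep_eq, List.getElem?_set_ne]
    exact fun hb => hni (hb ▸ List.mem_cons_self)

theorem getElem?_foldl_segAStep (wormbbox : List Int) (l : List Nat) (row : List Int)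
    (i : Nat) (hi : i ∈ l) (hnd : l.Nodup) :
    (l.foldl (segAStep wormbbox) row)[i]? =
      (row[i]?).map (fun v => v - parityDelta wormbbox i) := by
  induction l generalizing row with
  | nil => cases hi
  | cons a l ih =>
    simp only [List.foldl_cons]
    rcases List.mem_cons.mp hi with h | h
    · subst h
      have hni : i ∉ l := (List.nodup_cons.mp hnd).1
      -- after the first step, index i is never touched again
      rw [foldl_segAStep_untouched wormbbox l _ i hni, segAStep_eq]
      by_cases hlt : i < row.length
      · rw [List.getElem?_set_self hlt, List.getElem?_eq_getElem hlt]
        simp [List.getD, List.getElem?_eq_getElem hlt]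
      · have hle : row.length ≤ i := by omega
        rw [List.getElem?_eq_none (by simpa using hle), List.getElem?_eq_none hle]
        rfl
    · have hne : a ≠ i := fun he => (List.nodup_cons.mp hnd).1 (he ▸ h)
      rw [ih _ h (List.nodup_cons.mp hnd).2]
      rw [segAStep_eq, List.getElem?_set_ne hne]

theorem getElem?_segShift (wormbbox : List Int) (row : List Int) (i : Nat) :
    (segShift wormbbox row)[i]? = (row[i]?).map (fun v => v - parityDelta wormbbox i) := by
  fun_induction segShift wormbbox row generalizing i with
  | case1 x y rest ih =>
    match i with
    | 0 => simp [parityDelta]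
    | 1 => simp [parityDelta]
    | (n + 2) =>
      have hpar : (n + 2) % 2 = n % 2 := by omega
      simp only [List.getElem?_cons_succ, ih n]
      unfold parityDelta
      rw [hpar]
  | case2 x => match i with
    | 0 => simp [parityDelta]
    | (n + 1) => simp
  | case3 => simp

theorem foldl_range_eq_segShift (wormbbox : List Int) (row : List Int) :
    (List.range row.length).foldl (segAStep wormbbox) row = segShift wormbbox row := by
  apply List.ext_getElem?
  intro i
  rw [getElem?_segShift]
  by_cases hi : i < row.length
  · exact getElem?_foldl_segAStep wormbbox _ row i (List.mem_range.mpr hi) List.nodup_range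
  · have h1 : ((List.range row.length).foldl (segAStep wormbbox) row).length ≤ i := by
      rw [length_foldl_segAStep]; omega
    rw [List.getElem?_eq_none h1, List.getElem?_eq_none (by omega)]
    rfl

-- ===== VERDICT (by name: the statement is the Claim_ definition above) =====
theorem seg_transpose_spec : Claim_equal_seg_transpose := by
  intro wormbbox embryo_seg _ _
  unfold Spec_seg_transpose seg_transpose seg_transpose_alt
  cases embryo_seg with
  | nil => rfl
  | cons row rest => simp [foldl_range_eq_segShift]
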